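-- pv_equiv track=rewrite | github.com/mendelcrrll/CSE443-project | backend/app/agents.py | _normalize_enabled_agents
-- ===== SOURCE A (Python) =====
-- SUPPORTING_NODES = {"definer", "redditor", "engager"}
--
-- def _normalize_enabled_agents(active_agent: str, enabled_agents: list[str]) -> list[str]:
--     if enabled_agents:
--         enabled = {name for name in enabled_agents if name in SUPPORTING_NODES}
--     else:
--         enabled = set(SUPPORTING_NODES)
--     if active_agent in enabled:
--         enabled.remove(active_agent)
--     return sorted(enabled)
-- ===== SOURCE B (Python) =====
-- SUPPORTING_NODES = {"definer", "redditor", "engager"}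
--
-- def _normalize_enabled_agents(active_agent: str, enabled_agents: list[str]) -> list[str]:
--     out = []
--     for name in ("definer", "engager", "redditor"):  # sorted(SUPPORTING_NODES)
--         if name != active_agent and (not enabled_agents or name in enabled_agents):
--             out.append(name)
--     return out
-- ===== Notes on version B (the rewrite author's own statement) =====
-- stated objective: simpler
-- what changed: B scans the fixed three-name universe in sorted order and emits matches directly, instead of building an intermediate set from the input, removing the active agent, and sorting the result.
import Mathlib
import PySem

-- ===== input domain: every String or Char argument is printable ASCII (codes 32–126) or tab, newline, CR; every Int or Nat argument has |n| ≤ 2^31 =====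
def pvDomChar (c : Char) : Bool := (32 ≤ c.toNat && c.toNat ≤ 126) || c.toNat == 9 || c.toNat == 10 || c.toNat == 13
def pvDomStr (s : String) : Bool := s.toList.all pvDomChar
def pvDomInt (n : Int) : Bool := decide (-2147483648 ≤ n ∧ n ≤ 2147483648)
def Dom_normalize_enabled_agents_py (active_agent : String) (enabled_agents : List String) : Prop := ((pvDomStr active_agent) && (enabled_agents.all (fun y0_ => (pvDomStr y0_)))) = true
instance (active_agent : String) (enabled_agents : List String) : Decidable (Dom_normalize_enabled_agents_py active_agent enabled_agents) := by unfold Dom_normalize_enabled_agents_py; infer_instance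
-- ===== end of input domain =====

-- B scans the fixed three-name universe in sorted order and emits matches directly; simpler, no intermediate set and no final sort.
-- ===== PORT A =====
def pvSupportingNodes : PySem.Set String := PySem.Set.ofList ["definer", "redditor", "engager"]

def normalize_enabled_agents_py (active_agent : String) (enabled_agents : List String) : List String :=
  let enabled : PySem.Set String :=
    if enabled_agents ≠ [] then
      PySem.Set.ofList (enabled_agents.filter (fun name => pvSupportingNodes.contains name))
    else
      pvSupportingNodes
  let enabled2 : PySem.Set String :=
    if enabled.contains active_agent then
      match PySem.Set.remove? enabled active_agent with
      | some s => s
      | none => enabled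
    else enabled
  PySem.List.sorted enabled2 (fun x => x) false

-- ===== PORT B =====
def normalize_enabled_agents_py_alt (active_agent : String) (enabled_agents : List String) : List String :=
  ["definer", "engager", "redditor"].filter
    (fun name => name != active_agent && (enabled_agents.isEmpty || enabled_agents.contains name))

-- ===== PRECONDITION & SPEC =====
def Spec_normalize_enabled_agents_py (active_agent : String) (enabled_agents : List String) (out : List String) : Prop := out = normalize_enabled_agents_py_alt active_agent enabled_agents
instance (active_agent : String) (enabled_agents : List String) (out : List String) : Decidable (Spec_normalize_enabled_agents_py active_agent enabled_agents out) := by unfold Spec_normalize_enabled_agents_py; infer_instance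

-- ===== CLAIM (what is proved, stated in full; the proofs are below) =====
def Claim_equal_normalize_enabled_agents_py : Prop := ∀ (active_agent : String) (enabled_agents : List String), Dom_normalize_enabled_agents_py active_agent enabled_agents → Spec_normalize_enabled_agents_py active_agent enabled_agents (normalize_enabled_agents_py active_agent enabled_agents)

-- ===== LEMMAS AND PROOFS =====

-- ===== VERDICT (by name: the statement is the Claim_ definition above) =====
theorem normalize_enabled_agents_py_spec : Claim_equal_normalize_enabled_agents_py := by
  intro a ea _
  unfold Spec_normalize_enabled_agents_py normalize_enabled_agents_py normalize_enabled_agents_py_alt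
  set enabled : PySem.Set String :=
    (if ea ≠ [] then PySem.Set.ofList (ea.filter (fun name => pvSupportingNodes.contains name))
     else pvSupportingNodes) with henabled
  have hnodup : enabled.Nodup := by
    rw [henabled]; split
    · exact PySem.Set.nodup_ofList _
    · exact PySem.Set.nodup_ofList _
  have hmem : ∀ x, x ∈ enabled ↔ (x ∈ pvSupportingNodes ∧ (ea = [] ∨ x ∈ ea)) := by
    intro x; rw [henabled]; split
    · rename_i h
      simp [PySem.Set.mem_ofList, List.mem_filter]
      tauto
    · rename_i h
      simp at h
      simp [h]
  set enabled2 : PySem.Set String :=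
    (if enabled.contains a then
      match PySem.Set.remove? enabled a with
      | some s => s
      | none => enabled
     else enabled) with h2
  have hnodup2 : enabled2.Nodup := by
    rw [h2]; split
    · rename_i hc
      rw [PySem.Set.remove?_of_mem (by simpa using hc)]
      exact PySem.Set.nodup_discard _ _ hnodup
    · exact hnodup
  have hmem2 : ∀ x, x ∈ enabled2 ↔ (x ∈ enabled ∧ x ≠ a) := by
    intro x; rw [h2]; split
    · rename_i hc
      rw [PySem.Set.remove?_of_mem (by simpa using hc)]
      exact PySem.Set.mem_discard _ _ _
    · rename_i hc
      have ha : a ∉ enabled := fun h => hc (by simpa using h)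
      constructor
      · exact fun hx => ⟨hx, fun he => ha (he ▸ hx)⟩
      · exact fun hx => hx.1
  apply PySem.List.sorted_eq_of_perm_of_pairwise_lt
  · -- Perm
    rw [List.perm_ext_iff_of_nodup (List.Nodup.filter _ (by decide)) hnodup2]
    intro x
    rw [hmem2, hmem]
    simp [List.mem_filter, pvSupportingNodes, PySem.Set.mem_ofList, List.isEmpty_iff]
    tauto
  · -- Pairwise
    apply List.Pairwise.filter
    simp [List.pairwise_cons, String.lt_iff_toList_lt]
    decide
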